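-- pv_equiv track=rewrite | github.com/facebookresearch/daqa | daqa-gen/generate_questions_answers.py | add_answer
-- ===== SOURCE A (Python) =====
-- def add_answer(ans_dist_per_temp, ques_temp, ans_tk, max_diff):
--     # Only one answer seen so far for this template
--     if len(ans_dist_per_temp[ques_temp].keys()) <= 1:
--         return True
--     # First instance of this answer in this template
--     if ans_dist_per_temp[ques_temp][ans_tk] == 0:
--         return True
--     num_occ = sorted(((v, k) for k, v in ans_dist_per_temp[ques_temp].items()))
--     # Not the most frequent answer
--     if num_occ[-1][1] != ans_tk:
--         return True
--     # Difference between the (most + 1) and least frequent is less than max_diff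
--     if ((num_occ[-1][0] + 1) - num_occ[0][0]) <= max_diff:
--         return True
--     return False
-- ===== SOURCE B (Python) =====
-- def add_answer(ans_dist_per_temp, ques_temp, ans_tk, max_diff):
--     # One linear pass over the distribution: count entries, remember ans_tk's
--     # count, and track the max (count, key) tuple and the min count.
--     n = 0
--     cur = None
--     hi = None
--     lo = None
--     for k, v in ans_dist_per_temp[ques_temp].items():
--         n += 1
--         if k == ans_tk:
--             cur = v
--         if hi is None or hi < (v, k):
--             hi = (v, k)
--         if lo is None or v < lo:
--             lo = v
--     if n <= 1 or cur == 0: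
--         return True
--     return hi[1] != ans_tk or hi[0] + 1 - lo <= max_diff
-- ===== Notes on version B (the rewrite author's own statement) =====
-- stated objective: alternative
-- what changed: Replaces the sort of (count, answer) pairs and the staged early returns by one fold over the distribution's items that simultaneously counts entries, records ans_tk's count and tracks the running max (count,key) tuple and min count, followed by a single boolean formula.
import Mathlib
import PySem

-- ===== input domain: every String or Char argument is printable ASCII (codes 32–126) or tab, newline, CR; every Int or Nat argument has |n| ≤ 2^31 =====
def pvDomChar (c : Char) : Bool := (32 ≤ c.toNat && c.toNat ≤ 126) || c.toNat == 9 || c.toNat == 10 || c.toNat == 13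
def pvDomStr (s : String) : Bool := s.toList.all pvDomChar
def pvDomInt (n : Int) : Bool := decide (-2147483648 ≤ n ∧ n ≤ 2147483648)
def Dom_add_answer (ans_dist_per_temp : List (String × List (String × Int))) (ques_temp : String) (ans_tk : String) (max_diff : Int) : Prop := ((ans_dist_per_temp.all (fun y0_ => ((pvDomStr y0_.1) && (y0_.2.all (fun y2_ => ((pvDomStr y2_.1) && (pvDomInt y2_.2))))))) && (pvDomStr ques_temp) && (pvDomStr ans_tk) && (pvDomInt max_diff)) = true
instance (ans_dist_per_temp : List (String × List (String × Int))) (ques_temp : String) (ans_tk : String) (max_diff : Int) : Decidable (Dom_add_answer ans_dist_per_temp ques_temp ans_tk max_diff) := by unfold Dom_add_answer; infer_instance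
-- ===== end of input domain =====

-- B replaces A's sort of (count, answer) pairs and staged early returns by ONE fold over the
-- distribution's items (count, ans_tk's count, running max (count,key) tuple, running min count)
-- followed by a single boolean formula (alternative algorithm: linear scan instead of a sort).


-- ===== PORT A =====
def add_answer (ans_dist_per_temp : List (String × List (String × Int))) (ques_temp : String) (ans_tk : String) (max_diff : Int) : Bool :=
  match (PySem.Dict.ofList ans_dist_per_temp).get? ques_temp with
  | none => true  -- Python raises KeyError here; excluded by Pre_
  | some raw =>
    let d := PySem.Dict.ofList raw
    if d.keys.length ≤ 1 then true
    else
      match d.get? ans_tk with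
      | none => true  -- Python raises KeyError here; excluded by Pre_
      | some c =>
        if c = 0 then true
        else
          let num_occ := PySem.List.sorted2 (d.items.map (fun kv => (kv.2, kv.1))) (fun p => p.1) (fun p => p.2)
          match num_occ.getLast?, num_occ.head? with
          | some hi, some lo =>
            if hi.2 ≠ ans_tk then true
            else if (hi.1 + 1) - lo.1 ≤ max_diff then true
            else false
          | _, _ => true  -- unreachable: num_occ is nonempty since the dict has ≥ 2 keys

-- ===== PORT B =====
-- state of B's single loop: (n, cur, hi, lo)
def pvStepB (ans_tk : String) (st : Int × Option Int × Option (Int × String) × Option Int)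
    (kv : String × Int) : Int × Option Int × Option (Int × String) × Option Int :=
  ( st.1 + 1,
    if kv.1 = ans_tk then some kv.2 else st.2.1,
    -- Python tuple comparison hi < (v, k)
    (match st.2.2.1 with
     | none => some (kv.2, kv.1)
     | some h =>
       if decide (h.1 < kv.2) || (!decide (kv.2 < h.1) && decide (h.2 < kv.1)) then
         some (kv.2, kv.1)
       else some h),
    (match st.2.2.2 with
     | none => some kv.2
     | some l => if kv.2 < l then some kv.2 else some l) )

def add_answer_alt (ans_dist_per_temp : List (String × List (String × Int))) (ques_temp : String) (ans_tk : String) (max_diff : Int) : Bool :=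
  -- 'true' on a missing template: Python raises KeyError there; excluded by Pre_
  ((PySem.Dict.ofList ans_dist_per_temp).get? ques_temp).elim true (fun raw =>
    let st := (PySem.Dict.ofList raw).items.foldl (pvStepB ans_tk) (0, none, none, none)
    if st.1 ≤ 1 ∨ st.2.1 = some 0 then true
    else
      -- hi and lo are always set here: the loop ran at least twice
      st.2.2.1.elim true (fun hi =>
        st.2.2.2.elim true (fun lo =>
          decide (hi.2 ≠ ans_tk) || decide (hi.1 + 1 - lo ≤ max_diff))))

-- ===== PRECONDITION & SPEC =====
-- the inner dict registered for ques_temp ([] when the template is absent, but then Pre_ is False anyway)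
def pvInner_add_answer (ans_dist_per_temp : List (String × List (String × Int))) (ques_temp : String) : List (String × Int) :=
  ((PySem.Dict.ofList ans_dist_per_temp).get? ques_temp).getD []

-- Pre_ excludes exactly the inputs where Python A raises KeyError: an unknown template, or
-- (with ≥ 2 answers recorded) an answer token absent from the template's distribution.
def Pre_add_answer (ans_dist_per_temp : List (String × List (String × Int))) (ques_temp : String) (ans_tk : String) (max_diff : Int) : Prop :=
  (PySem.Dict.ofList ans_dist_per_temp).contains ques_temp = true ∧
  ((PySem.Dict.ofList (pvInner_add_answer ans_dist_per_temp ques_temp)).size ≤ 1 ∨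
   (PySem.Dict.ofList (pvInner_add_answer ans_dist_per_temp ques_temp)).contains ans_tk = true)
instance (ans_dist_per_temp : List (String × List (String × Int))) (ques_temp : String) (ans_tk : String) (max_diff : Int) : Decidable (Pre_add_answer ans_dist_per_temp ques_temp ans_tk max_diff) := by unfold Pre_add_answer; infer_instance

def pvWitness_add_answer : (List (String × List (String × Int))) × String × String × Int :=
  ([("t", [("a", 1), ("b", 2)])], "t", "a", 2)

def Spec_add_answer (ans_dist_per_temp : List (String × List (String × Int))) (ques_temp : String) (ans_tk : String) (max_diff : Int) (out : Bool) : Prop := out = add_answer_alt ans_dist_per_temp ques_temp ans_tk max_diff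
instance (ans_dist_per_temp : List (String × List (String × Int))) (ques_temp : String) (ans_tk : String) (max_diff : Int) (out : Bool) : Decidable (Spec_add_answer ans_dist_per_temp ques_temp ans_tk max_diff out) := by unfold Spec_add_answer; infer_instance

-- ===== CLAIM (what is proved, stated in full; the proofs are below) =====
def Claim_equal_add_answer : Prop := ∀ (ans_dist_per_temp : List (String × List (String × Int))) (ques_temp : String) (ans_tk : String) (max_diff : Int), Dom_add_answer ans_dist_per_temp ques_temp ans_tk max_diff → Pre_add_answer ans_dist_per_temp ques_temp ans_tk max_diff → Spec_add_answer ans_dist_per_temp ques_temp ans_tk max_diff (add_answer ans_dist_per_temp ques_temp ans_tk max_diff)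

-- ===== LEMMAS AND PROOFS =====

-- Python's tuple comparison on (Int, String) pairs is the lexicographic order ×ₗ
theorem pvLexlt_eq (a b : Int × String) :
    (decide (a.1 < b.1) || (!decide (b.1 < a.1) && decide (a.2 < b.2))) = decide (toLex a < toLex b) := by
  rcases lt_trichotomy a.1 b.1 with h | h | h
  · simp [h, asymm h, Prod.Lex.toLex_lt_toLex]
  · simp [h, Prod.Lex.toLex_lt_toLex]
  · simp [Prod.Lex.toLex_lt_toLex, h, asymm h, h.ne']

-- B's fold acts componentwise: it is the product of four independent folds
theorem pvFoldB_split (tk : String) (l : List (String × Int))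
    (n : Int) (cur : Option Int) (hi : Option (Int × String)) (lo : Option Int) :
    l.foldl (pvStepB tk) (n, cur, hi, lo) =
      ( n + l.length,
        l.foldl (fun c kv => if kv.1 = tk then some kv.2 else c) cur,
        l.foldl (fun h kv =>
          match h with
          | none => some (kv.2, kv.1)
          | some h =>
            if decide (h.1 < kv.2) || (!decide (kv.2 < h.1) && decide (h.2 < kv.1)) then
              some (kv.2, kv.1)
            else some h) hi,
        l.foldl (fun m kv =>
          match m with
          | none => some kv.2
          | some m => if kv.2 < m then some kv.2 else some m) lo ) := by
  induction l generalizing n cur hi lo with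
  | nil => simp
  | cons x t ih =>
    simp only [List.foldl_cons, List.length_cons, pvStepB, ih]
    refine Prod.ext (by push_cast; ring) rfl

-- the hi-fold is PySem.List.max? over the swapped pairs under the lexicographic key
theorem pvFoldHi_eq_max (l : List (String × Int)) :
    l.foldl (fun h kv =>
        match h with
        | none => some (kv.2, kv.1)
        | some h =>
          if decide (h.1 < kv.2) || (!decide (kv.2 < h.1) && decide (h.2 < kv.1)) then
            some (kv.2, kv.1)
          else some h) none =
      PySem.List.max? (l.map (fun kv => (kv.2, kv.1))) (fun p => toLex p) := by
  simp only [PySem.List.max?, List.foldl_map]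
  congr 1
  funext acc kv
  cases acc with
  | none => rfl
  | some m => simp only [pvLexlt_eq m (kv.2, kv.1), decide_eq_true_eq]

-- the lo-fold is PySem.List.min? over the values
theorem pvFoldLo_eq_min (l : List (String × Int)) :
    l.foldl (fun m kv =>
        match m with
        | none => some kv.2
        | some m => if kv.2 < m then some kv.2 else some m) none =
      PySem.List.min? (l.map (fun kv => kv.2)) (fun v => v) := by
  simp only [PySem.List.min?, List.foldl_map]
  congr 1
  funext acc kv
  cases acc <;> rfl

-- with unique keys, the "remember the last match" fold is the first-match lookup
theorem pvFoldCur_none (tk : String) (l : List (String × Int))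
    (h : tk ∉ l.map Prod.fst) (c : Option Int) :
    l.foldl (fun c kv => if kv.1 = tk then some kv.2 else c) c = c := by
  induction l generalizing c with
  | nil => rfl
  | cons x t ih =>
    simp only [List.map_cons, List.mem_cons, not_or] at h
    simp only [List.foldl_cons]
    rw [if_neg (Ne.symm h.1)]
    exact ih h.2 c

theorem pvFoldCur_eq_find (tk : String) (l : List (String × Int))
    (hnd : (l.map Prod.fst).Nodup) :
    l.foldl (fun c kv => if kv.1 = tk then some kv.2 else c) none =
      (l.find? (fun p => p.1 == tk)).map (fun p => p.2) := by
  induction l with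
  | nil => rfl
  | cons x t ih =>
    simp only [List.map_cons, List.nodup_cons] at hnd
    by_cases hx : x.1 = tk
    · rw [List.foldl_cons, if_pos hx, pvFoldCur_none tk t (by rw [← hx]; exact hnd.1),
        List.find?_cons_of_pos (by simp [hx])]
      rfl
    · rw [List.foldl_cons, if_neg hx, List.find?_cons_of_neg (by simp [hx])]
      exact ih hnd.2

-- in a ≤-pairwise (sorted) list, every element's key is ≤ the last element's key
theorem pvKey_le_getLast {α κ : Type} [LinearOrder κ] (key : α → κ) (l : List α)
    (hp : l.Pairwise (fun a b => key a ≤ key b)) (hne : l ≠ []) :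
    ∀ y ∈ l, key y ≤ key (l.getLast hne) := by
  induction l with
  | nil => exact absurd rfl hne
  | cons a t ih =>
    intro y hy
    cases t with
    | nil => simp at hy; simp [hy]
    | cons b t' =>
      rw [List.getLast_cons (by simp)]
      rcases List.mem_cons.mp hy with rfl | hyt
      · exact le_trans (List.rel_of_pairwise_cons hp (List.getLast_mem _)) (le_refl _)
      · exact ih hp.of_cons (by simp) y hyt

-- A's sorted over (count, key) tuples is PySem.List.sorted under the lexicographic key
theorem pvSorted2_eq_sorted_lex (xs : List (Int × String)) :
    PySem.List.sorted2 xs (fun p => p.1) (fun p => p.2) =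
      PySem.List.sorted xs (fun p => toLex p) := by
  simp only [PySem.List.sorted2, PySem.List.sorted, Bool.false_eq_true, if_false]
  congr 1
  funext acc x
  congr 1
  funext a b
  exact pvLexlt_eq a b

-- ===== VERDICT (by name: the statements are the Claim_ definitions above) =====
theorem add_answer_spec : Claim_equal_add_answer := by
  intro outer q tk md _ hpre
  unfold Spec_add_answer
  obtain ⟨hc, hp2⟩ := hpre
  rw [PySem.Dict.contains_eq_isSome_get?] at hc
  obtain ⟨raw, hraw⟩ := Option.isSome_iff_exists.mp hc
  have hinner : pvInner_add_answer outer q = raw := by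
    simp [pvInner_add_answer, hraw]
  rw [hinner] at hp2
  unfold add_answer add_answer_alt
  rw [hraw]
  simp only [Option.elim]
  set d := PySem.Dict.ofList raw with hd
  have hknd : d.keys.Nodup := PySem.Dict.nodup_keys_ofList raw
  have hkl : d.keys.length = d.size := by
    simp [PySem.Dict.keys, PySem.Dict.size]
  have hlen : d.items.length = d.size := rfl
  -- rewrite B's fold into its four components
  rw [pvFoldB_split]
  simp only [pvFoldHi_eq_max, pvFoldLo_eq_min,
    pvFoldCur_eq_find tk d.items (by simpa [PySem.Dict.keys] using hknd)]
  have hget : d.get? tk = (d.items.find? (fun p => p.1 == tk)).map (fun p => p.2) := rfl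
  by_cases hsz : d.size ≤ 1
  · simp [hkl, hsz, hlen]
  · rw [hkl]
    simp only [if_neg hsz]
    have hn1 : ¬ ((0 : Int) + (d.items.length : Int) ≤ 1) := by
      rw [hlen]; omega
    rcases hp2 with h1 | h2
    · exact absurd h1 hsz
    rw [PySem.Dict.contains_eq_isSome_get?] at h2
    obtain ⟨c, hcv⟩ := Option.isSome_iff_exists.mp h2
    rw [hcv]
    rw [hget] at hcv
    rw [hcv]
    by_cases hc0 : c = 0
    · simp [hc0, hn1]
    · simp only [if_neg hc0]
      rw [if_neg (by
        rintro (h | h)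
        · exact hn1 h
        · exact hc0 (Option.some.inj h))]
      -- the main branch
      have hitems : d.items ≠ [] := by
        intro h
        simp [PySem.Dict.size, h] at hsz
      set pairs := d.items.map (fun kv => (kv.2, kv.1)) with hpairs
      have hpne : pairs ≠ [] := by simpa [hpairs] using hitems
      rw [pvSorted2_eq_sorted_lex]
      set num_occ := PySem.List.sorted pairs (fun p => toLex p) with hno
      have hnone : num_occ ≠ [] := by
        rw [hno, Ne, PySem.List.sorted_eq_nil_iff]; exact hpne
      rw [List.getLast?_eq_some_getLast hnone]
      set hi := num_occ.getLast hnone with hhi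
      obtain ⟨lo, t, hlot⟩ : ∃ lo t, num_occ = lo :: t := by
        cases hnoe : num_occ with
        | nil => exact absurd hnoe hnone
        | cons a b => exact ⟨a, b, rfl⟩
      rw [hlot]; simp only [List.head?_cons]
      -- B's max component
      obtain ⟨m, hm⟩ : ∃ m, PySem.List.max? pairs (fun p => toLex p) = some m := by
        cases hmm : PySem.List.max? pairs (fun p => toLex p) with
        | none => exact absurd ((PySem.List.max?_eq_none_iff _ _).mp hmm) hpne
        | some m => exact ⟨m, rfl⟩
      rw [hm]
      -- hi = m
      have hhimem : hi ∈ pairs := (PySem.List.mem_sorted _ _ _ _).mp (List.getLast_mem hnone)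
      have hmmem : m ∈ pairs := PySem.List.max?_mem hm
      have hpw := PySem.List.sorted_pairwise pairs (fun p => toLex p)
      have hle1 : toLex hi ≤ toLex m := PySem.List.max?_isMax hm hi hhimem
      have hle2 : toLex m ≤ toLex hi :=
        pvKey_le_getLast _ num_occ hpw hnone m ((PySem.List.mem_sorted _ _ _ _).mpr hmmem)
      have hm_eq : m = hi := toLex.injective (le_antisymm hle2 hle1)
      rw [hm_eq]
      -- B's min component
      obtain ⟨mv, hmv⟩ : ∃ mv, PySem.List.min? (d.items.map (fun kv => kv.2)) (fun v => v) = some mv := by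
        cases hmm : PySem.List.min? (d.items.map (fun kv => kv.2)) (fun v => v) with
        | none =>
          exact absurd ((PySem.List.min?_eq_none_iff _ _).mp hmm) (by simp [hitems])
        | some m => exact ⟨m, rfl⟩
      rw [hmv]
      have hlomem : lo ∈ pairs := by
        have hl : lo ∈ num_occ := by rw [hlot]; exact List.mem_cons_self
        exact (PySem.List.mem_sorted pairs (fun p => toLex p) false lo).mp hl
      have hvals : d.items.map (fun kv => kv.2) = pairs.map (fun p => p.1) := by
        simp [hpairs]
      have h1 : mv ≤ lo.1 := by
        have : lo.1 ∈ d.items.map (fun kv => kv.2) := by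
          rw [hvals]; exact List.mem_map_of_mem hlomem
        exact PySem.List.min?_isMin hmv lo.1 this
      have h2 : lo.1 ≤ mv := by
        have hmvmem : mv ∈ d.items.map (fun kv => kv.2) := PySem.List.min?_mem hmv
        rw [hvals] at hmvmem
        obtain ⟨p, hpmem, hpeq⟩ := List.mem_map.mp hmvmem
        have := PySem.List.key_head_sorted_le pairs (fun p => toLex p) (hno.symm.trans hlot) p hpmem
        have := (Prod.Lex.toLex_le_toLex.mp this)
        rcases this with h | ⟨h, _⟩
        · omega
        · omega
      have hlomv : lo.1 = mv := le_antisymm h2 h1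
      rw [hlomv]
      by_cases htk : hi.2 ≠ tk
      · simp [htk]
      · push_neg at htk
        by_cases hcmp : (hi.1 + 1) - mv ≤ md
        · simp [htk, hcmp]
        · simp [htk, hcmp]
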